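-- pv_equiv track=rewrite | github.com/jonasrenault/advent | advent/advent2024/day23.py | find_bigger_group
-- ===== SOURCE A (Python) =====
-- from collections.abc import Iterable
--
-- def find_bigger_group(computers: set[str], connections: set[str], groups: set[str]):
--     bigger_group = set()
--     for group in groups:
--         for comp in computers:
--             if comp not in group and is_connected_to_all(
--                 comp, group.split(","), connections
--             ):
--                 g = ",".join(sorted(group.split(",") + [comp]))
--                 bigger_group.add(g)
--
--     return bigger_group
--
-- def is_connected_to_all(node: str, nodes: Iterable[str], connections: set[str]) -> bool:
--     for other_node in nodes:
--         if "".join(sorted([node, other_node])) not in connections: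
--             return False
--     return True
-- ===== SOURCE B (Python) =====
-- def find_bigger_group(computers, connections, groups):
--     conn = set(connections)
--     members = list(dict.fromkeys(m for g in groups for m in g.split(",")))
--     nbrs = {c: frozenset(m for m in members
--                          if ((c + m) if c <= m else (m + c)) in conn)
--             for c in computers}
--     bigger = set()
--     for g in groups:
--         parts = g.split(",")
--         pset = frozenset(parts)
--         for c in computers:
--             if c not in g and pset <= nbrs[c]:
--                 bigger.add(",".join(sorted(parts + [c])))
--     return bigger
-- ===== Notes on version B (the rewrite author's own statement) =====
-- stated objective: faster
-- what changed: B precomputes each computer's neighbour set (one membership-filtered set per computer, built once from the deduplicated group members) and tests each (group, computer) pair with a frozenset subset check, instead of A's per-pair sort-and-join connection probe inside the inner loop.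
import Mathlib
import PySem

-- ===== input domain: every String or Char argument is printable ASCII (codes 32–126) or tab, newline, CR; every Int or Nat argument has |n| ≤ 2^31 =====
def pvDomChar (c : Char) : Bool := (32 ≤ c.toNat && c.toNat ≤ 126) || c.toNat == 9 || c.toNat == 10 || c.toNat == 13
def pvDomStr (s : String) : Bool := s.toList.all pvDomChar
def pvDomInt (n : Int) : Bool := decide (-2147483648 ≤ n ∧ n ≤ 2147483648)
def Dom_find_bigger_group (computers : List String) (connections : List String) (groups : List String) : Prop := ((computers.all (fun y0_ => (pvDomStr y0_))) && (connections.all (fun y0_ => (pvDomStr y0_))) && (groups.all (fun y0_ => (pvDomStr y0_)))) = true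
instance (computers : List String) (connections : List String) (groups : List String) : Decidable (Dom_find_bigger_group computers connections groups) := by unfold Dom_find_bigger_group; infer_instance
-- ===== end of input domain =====

-- B precomputes each computer's neighbour set once and replaces A's per-pair sort/join
-- probe by a subset test (objective: faster by a constant-factor mechanism if measured so).
-- Equivalence is about the returned SET of strings (both ports build it in the same order).

-- ===== PORT A =====
-- s.split(",") (non-empty literal separator; exact via PySem.Chars.splitOn)
def pySplitComma (s : String) : List String := (PySem.Chars.splitOn s.toList [',']).map String.ofList

-- helper is_connected_to_all, early-return loop kept as structural recursion
def is_connected_to_all (node : String) (nodes : List String) (connections : List String) : Bool :=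
  match nodes with
  | [] => true
  | other_node :: rest =>
    if !(PySem.Set.contains connections (PySem.Str.join "" (PySem.List.sorted [node, other_node] (fun x => x) false))) then
      false
    else
      is_connected_to_all node rest connections

def find_bigger_group (computers : List String) (connections : List String) (groups : List String) : List String :=
  groups.foldl (fun bigger_group group =>
    computers.foldl (fun bigger_group comp =>
      if !(PySem.Str.isIn comp group) &&
         is_connected_to_all comp (pySplitComma group) connections then
        PySem.Set.add bigger_group
          (PySem.Str.join "," (PySem.List.sorted (pySplitComma group ++ [comp]) (fun x => x) false))
      else bigger_group) bigger_group) []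

-- ===== PORT B =====
-- (c + m if c <= m else m + c): Python str '+' ported as join with empty separator (exact)
def fbgKey (c m : String) : String :=
  if c ≤ m then PySem.Str.join "" [c, m] else PySem.Str.join "" [m, c]

def find_bigger_group_alt (computers : List String) (connections : List String) (groups : List String) : List String :=
  let conn := PySem.Set.ofList connections
  let members := PySem.List.dedup (groups.flatMap (fun g => pySplitComma g))
  let nbrs := PySem.Dict.mk (computers.map (fun c =>
    (c, PySem.Set.ofList (members.filter (fun m => PySem.Set.contains conn (fbgKey c m))))))
  groups.foldl (fun bigger g =>
    let parts := pySplitComma g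
    let pset := PySem.Set.ofList parts
    computers.foldl (fun bigger c =>
      if !(PySem.Str.isIn c g) && PySem.Set.issubset pset (nbrs.getD c []) then
        PySem.Set.add bigger (PySem.Str.join "," (PySem.List.sorted (parts ++ [c]) (fun x => x) false))
      else bigger) bigger) []

-- ===== PRECONDITION & SPEC =====
def Spec_find_bigger_group (computers : List String) (connections : List String) (groups : List String) (out : List String) : Prop := out = find_bigger_group_alt computers connections groups
instance (computers : List String) (connections : List String) (groups : List String) (out : List String) : Decidable (Spec_find_bigger_group computers connections groups out) := by unfold Spec_find_bigger_group; infer_instance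

-- ===== CLAIM (what is proved, stated in full; the proofs are below) =====
def Claim_equal_find_bigger_group : Prop := ∀ (computers : List String) (connections : List String) (groups : List String), Dom_find_bigger_group computers connections groups → Spec_find_bigger_group computers connections groups (find_bigger_group computers connections groups)

-- ===== LEMMAS AND PROOFS =====

-- sorted on a two-element list is a min/max split
theorem sorted_pair (a b : String) :
    PySem.List.sorted [a, b] (fun x => x) false = if a ≤ b then [a, b] else [b, a] := by
  rw [PySem.List.sorted_eq_foldl_insertBy]
  simp [List.foldl, PySem.List.insertBy]
  split_ifs with h1 h2 <;> first
  | rfl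
  | (exact absurd ‹a.toList ≤ b.toList› (not_le.mpr h1))
  | (exact absurd (not_lt.mp h1) ‹¬ a.toList ≤ b.toList›)

-- A's per-pair "".join(sorted([node, other])) equals B's ordered concatenation
theorem key_eq (c m : String) :
    PySem.Str.join "" (PySem.List.sorted [c, m] (fun x => x) false) = fbgKey c m := by
  rw [sorted_pair, fbgKey]
  split_ifs <;> rfl

-- the early-return loop is List.all of the pair test
theorem is_connected_to_all_eq (node : String) (nodes : List String) (connections : List String) :
    is_connected_to_all node nodes connections
      = nodes.all (fun m => PySem.Set.contains connections (fbgKey node m)) := by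
  induction nodes with
  | nil => rfl
  | cons x rest ih => simp [is_connected_to_all, key_eq, List.all_cons, ih]

-- first-match lookup in the dict built by mapping over computers
theorem dict_map_getD (f : String → List String) (computers : List String) (c : String)
    (hc : c ∈ computers) :
    (PySem.Dict.mk (computers.map (fun x => (x, f x)))).getD c [] = f c := by
  induction computers with
  | nil => cases hc
  | cons y rest ih =>
      rw [List.map_cons, PySem.Dict.getD_eq_get?_getD, PySem.Dict.get?_mk_cons]
      by_cases h : y = c
      · simp [h]
      · simp only [beq_iff_eq, h, if_false]
        rw [← PySem.Dict.getD_eq_get?_getD]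
        exact ih ((List.mem_cons.mp hc).resolve_left (fun hcy => h hcy.symm))

-- subset test against the filtered member list = the all-pairs test, given parts ⊆ members
theorem issubset_filter (parts members : List String) (p : String → Bool)
    (h : ∀ m ∈ parts, m ∈ members) :
    PySem.Set.issubset (PySem.Set.ofList parts) (PySem.Set.ofList (members.filter p))
      = parts.all p := by
  rw [Bool.eq_iff_iff, PySem.Set.issubset_iff]
  simp only [PySem.Set.mem_ofList, List.mem_filter, List.all_eq_true]
  exact ⟨fun hs m hm => (hs m hm).2, fun hs m hm => ⟨h m hm, hs m hm⟩⟩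

theorem find_bigger_group_eq (computers connections groups : List String) :
    find_bigger_group computers connections groups
      = find_bigger_group_alt computers connections groups := by
  unfold find_bigger_group find_bigger_group_alt
  apply PySem.List.foldl_congr_mem
  intro acc g hg
  apply PySem.List.foldl_congr_mem
  intro acc2 c hc
  have hmem : ∀ m ∈ pySplitComma g, m ∈ PySem.List.dedup (groups.flatMap (fun g => pySplitComma g)) := by
    intro m hm
    rw [PySem.List.mem_dedup]
    exact List.mem_flatMap.mpr ⟨g, hg, hm⟩
  rw [is_connected_to_all_eq,
      dict_map_getD (fun x => PySem.Set.ofList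
        ((PySem.List.dedup (groups.flatMap (fun g => pySplitComma g))).filter
          (fun m => PySem.Set.contains (PySem.Set.ofList connections) (fbgKey x m)))) computers c hc,
      issubset_filter _ _ _ hmem]
  have hcon : ∀ m, PySem.Set.contains connections (fbgKey c m)
      = PySem.Set.contains (PySem.Set.ofList connections) (fbgKey c m) := by
    intro m
    rw [Bool.eq_iff_iff, PySem.Set.contains_iff, PySem.Set.contains_iff, PySem.Set.mem_ofList]
  simp only [hcon]

-- ===== VERDICT (by name: the statement is the Claim_ definition above) =====
theorem find_bigger_group_spec : Claim_equal_find_bigger_group := by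
  intro computers connections groups _
  exact find_bigger_group_eq computers connections groups
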